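-- pv_equiv track=rewrite | github.com/codesaint2/study-material | maximizer/maximizer.py | maximizer
-- ===== SOURCE A (Python) =====
-- def maximizer(length, input_arr): # 3, [“2 3”, “3 6”, “4 1”]
--     minRow = 0
--     minCol = 0
--     for i in range(length):
--         string_arr = input_arr[i].split() # ['2', '3']
--         if (i == 0):
--             minRow = int(string_arr[0])
--             minCol = int(string_arr[1])
--         else:
--             if (int(string_arr[0]) < minRow):
--                 minRow = int(string_arr[0])
--             if (int(string_arr[1]) < minCol):
--                 minCol = int(string_arr[1])
--     return minRow * minCol
-- ===== SOURCE B (Python) =====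
-- def maximizer(length, input_arr):
--     if length <= 0:
--         return 0
--     rows = [input_arr[i].split() for i in range(length)]
--     first = sorted(int(r[0]) for r in rows)
--     second = sorted(int(r[1]) for r in rows)
--     return first[0] * second[0]
-- ===== Notes on version B (the rewrite author's own statement) =====
-- stated objective: alternative
-- what changed: Replaces A's fused single pass with running minima and i==0 initialization by a length<=0 guard, a parse stage, and a sort-then-take-head computation of each column minimum (sorted(col)[0]).
import Mathlib
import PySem

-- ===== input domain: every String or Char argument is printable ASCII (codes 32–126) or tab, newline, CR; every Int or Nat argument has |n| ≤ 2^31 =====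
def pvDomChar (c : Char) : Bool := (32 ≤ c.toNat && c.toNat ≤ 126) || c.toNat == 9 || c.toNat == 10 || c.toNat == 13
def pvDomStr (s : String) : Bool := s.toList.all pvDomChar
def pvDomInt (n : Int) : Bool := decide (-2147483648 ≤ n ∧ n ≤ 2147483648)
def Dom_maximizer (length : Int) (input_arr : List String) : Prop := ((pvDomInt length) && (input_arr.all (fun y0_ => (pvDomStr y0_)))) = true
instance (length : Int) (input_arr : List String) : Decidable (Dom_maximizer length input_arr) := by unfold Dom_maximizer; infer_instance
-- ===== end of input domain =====

-- B replaces A's fused single pass (with i==0 initialization and running minima) by a guard,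
-- a parse stage, and a sort-then-take-head computation of each column minimum: alternative algorithm.

-- int(ts[k]) totalized: Pre_ guarantees the token exists and parses
def pvTok (ts : List String) (k : Int) : Int :=
  ((PySem.List.pyGet? ts k).bind PySem.Int.ofStr?).getD 0

-- ===== PORT A =====
def maximizer (length : Int) (input_arr : List String) : Int :=
  let st := (PySem.List.pyRange 0 length 1).foldl
    (fun (st : Int × Int) i =>
      let string_arr := PySem.Str.split₀ ((PySem.List.pyGet? input_arr i).getD "")
      if i == 0 then (pvTok string_arr 0, pvTok string_arr 1)
      else ((if pvTok string_arr 0 < st.1 then pvTok string_arr 0 else st.1),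
            (if pvTok string_arr 1 < st.2 then pvTok string_arr 1 else st.2)))
    ((0 : Int), (0 : Int))
  st.1 * st.2

-- ===== PORT B =====
def maximizer_alt (length : Int) (input_arr : List String) : Int :=
  if length ≤ 0 then 0
  else
    let rows := (List.range length.toNat).map
      (fun i : Nat => PySem.Str.split₀ ((PySem.List.pyGet? input_arr (i : Int)).getD ""))
    let first := PySem.List.sorted (rows.map (fun r => pvTok r 0)) (fun x => x) false
    let second := PySem.List.sorted (rows.map (fun r => pvTok r 1)) (fun x => x) false
    ((PySem.List.pyGet? first 0).getD 0) * ((PySem.List.pyGet? second 0).getD 0)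

-- ===== PRECONDITION & SPEC =====
-- Pre_ excludes exactly the inputs where Python A raises: an index i < length beyond the
-- list (IndexError), a row whose split has fewer than two tokens (IndexError), or a first
-- or second token int() cannot parse (ValueError).
def Pre_maximizer (length : Int) (input_arr : List String) : Prop :=
  length ≤ (input_arr.length : Int) ∧
  ∀ s ∈ input_arr.take length.toNat,
    ((((PySem.Str.split₀ s)[0]?).bind PySem.Int.ofStr?).isSome = true ∧
     (((PySem.Str.split₀ s)[1]?).bind PySem.Int.ofStr?).isSome = true)
instance (length : Int) (input_arr : List String) : Decidable (Pre_maximizer length input_arr) := by unfold Pre_maximizer; infer_instance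

def pvWitness_maximizer : Int × List String := (3, ["2 3", "3 6", "4 1"])

def Spec_maximizer (length : Int) (input_arr : List String) (out : Int) : Prop := out = maximizer_alt length input_arr
instance (length : Int) (input_arr : List String) (out : Int) : Decidable (Spec_maximizer length input_arr out) := by unfold Spec_maximizer; infer_instance

-- ===== CLAIM (what is proved, stated in full; the proofs are below) =====
def Claim_equal_maximizer : Prop := ∀ (length : Int) (input_arr : List String), Dom_maximizer length input_arr → Pre_maximizer length input_arr → Spec_maximizer length input_arr (maximizer length input_arr)

-- ===== LEMMAS AND PROOFS =====

-- min(<nonempty sequence>), used only in the proofs as the common value of both programs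
def pvMin : List Int → Int
  | [] => 0
  | x :: xs => xs.foldl min x

-- A's fold step, with the row lookup abstracted into h
def pvStep (h : Int → Int × Int) (st : Int × Int) (i : Int) : Int × Int :=
  if i == 0 then h i
  else ((if (h i).1 < st.1 then (h i).1 else st.1),
        (if (h i).2 < st.2 then (h i).2 else st.2))

theorem pvMin_append_singleton (x : Int) (xs : List Int) (a : Int) :
    pvMin ((x :: xs) ++ [a]) = min (pvMin (x :: xs)) a := by
  simp [pvMin, List.foldl_append]

theorem pvFold_eq (h : Int → Int × Int) (n : Nat) (hn : 1 ≤ n) :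
    (PySem.List.pyRange 0 (n : Int) 1).foldl (pvStep h) ((0 : Int), (0 : Int))
      = (pvMin (((List.range n).map (fun k : Nat => h (k : Int))).map Prod.fst),
         pvMin (((List.range n).map (fun k : Nat => h (k : Int))).map Prod.snd)) := by
  induction n with
  | zero => omega
  | succ m ih =>
    rcases Nat.eq_or_lt_of_le hn with h1 | h1
    · -- n = 1
      have : m = 0 := by omega
      subst this
      have : ((1 : Nat) : Int) = 0 + 1 := by norm_num
      rw [this, PySem.List.pyRange_one_singleton]
      simp [pvStep, pvMin, List.range_succ]
    · -- m ≥ 1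
      have hm : 1 ≤ m := by omega
      have hcast : ((m + 1 : Nat) : Int) = (m : Int) + 1 := by push_cast; ring
      have hne : ((m : Int) == 0) = false := by simp; omega
      have hmap : (List.range (m + 1)).map (fun k : Nat => h (k : Int))
          = ((List.range m).map (fun k : Nat => h (k : Int))) ++ [h (m : Int)] := by
        rw [List.range_succ, List.map_append, List.map_cons, List.map_nil]
      obtain ⟨x, xs, hx⟩ : ∃ x xs, (List.range m).map (fun k : Nat => h (k : Int)) = x :: xs := by
        rcases hl : (List.range m).map (fun k : Nat => h (k : Int)) with _ | ⟨x, xs⟩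
        · exfalso; have := congrArg List.length hl; simp at this; omega
        · exact ⟨x, xs, rfl⟩
      rw [hcast, PySem.List.pyRange_one_succ_right (by positivity), List.foldl_append, ih hm,
        hmap, hx, List.foldl_cons, List.foldl_nil]
      simp only [pvStep, hne, Bool.false_eq_true, if_false, List.map_append, List.map_cons,
        List.map_nil]
      rw [pvMin_append_singleton, pvMin_append_singleton]
      simp only [Prod.mk.injEq]
      constructor <;> (simp only [min_def]; split_ifs <;> omega)

-- head of the sorted list is the running minimum
theorem sorted_head_eq_pvMin (x : Int) (xs : List Int) :
    (PySem.List.pyGet? (PySem.List.sorted (x :: xs) (fun y => y) false) 0).getD 0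
      = pvMin (x :: xs) := by
  rcases hs : PySem.List.sorted (x :: xs) (fun y => y) false with _ | ⟨m, t⟩
  · exact absurd ((PySem.List.sorted_eq_nil_iff _ _ _).mp hs) (by simp)
  · have hmem : m ∈ x :: xs := by
      have : m ∈ PySem.List.sorted (x :: xs) (fun y => y) false := by rw [hs]; simp
      exact (PySem.List.mem_sorted _ _ _ _).mp this
    have hle : ∀ y ∈ x :: xs, m ≤ y := PySem.List.key_head_sorted_le (x :: xs) (fun y => y) hs
    have hminmem : pvMin (x :: xs) ∈ x :: xs := by
      have := PySem.List.min?_mem (key := fun y => y) (m := pvMin (x :: xs))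
        (by rw [PySem.List.min?_id_cons]; rfl)
      exact this
    have hminle : ∀ y ∈ x :: xs, pvMin (x :: xs) ≤ y :=
      PySem.List.min?_isMin (key := fun y => y)
        (by rw [PySem.List.min?_id_cons]; rfl)
    have h1 : m ≤ pvMin (x :: xs) := hle _ hminmem
    have h2 : pvMin (x :: xs) ≤ m := hminle _ hmem
    simp [PySem.List.pyGet?, PySem.List.pyIdx?]
    omega

theorem maximizer_eq_alt (length : Int) (input_arr : List String) :
    maximizer length input_arr = maximizer_alt length input_arr := by
  by_cases hle : length ≤ 0
  · simp [maximizer, maximizer_alt, hle, PySem.List.pyRange_one_eq_nil hle]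
  · rw [not_le] at hle
    have hn : 1 ≤ length.toNat := by omega
    have hcast : ((length.toNat : Nat) : Int) = length := Int.toNat_of_nonneg (by omega)
    have hstep : (fun (st : Int × Int) i =>
        let string_arr := PySem.Str.split₀ ((PySem.List.pyGet? input_arr i).getD "")
        if i == 0 then (pvTok string_arr 0, pvTok string_arr 1)
        else ((if pvTok string_arr 0 < st.1 then pvTok string_arr 0 else st.1),
              (if pvTok string_arr 1 < st.2 then pvTok string_arr 1 else st.2)))
        = pvStep (fun i =>
            let r := PySem.Str.split₀ ((PySem.List.pyGet? input_arr i).getD "")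
            (pvTok r 0, pvTok r 1)) := by
      funext st i; rfl
    obtain ⟨y, ys, hy⟩ : ∃ y ys, (List.range length.toNat).map
        (fun k : Nat =>
          let r := PySem.Str.split₀ ((PySem.List.pyGet? input_arr (k : Int)).getD "")
          ((pvTok r 0, pvTok r 1) : Int × Int)) = y :: ys := by
      rcases hl : (List.range length.toNat).map _ with _ | ⟨y, ys⟩
      · exfalso; have := congrArg List.length hl; simp at this; omega
      · exact ⟨y, ys, rfl⟩
    unfold maximizer maximizer_alt
    rw [hstep]
    rw [show (PySem.List.pyRange 0 length 1) = PySem.List.pyRange 0 ((length.toNat : Nat) : Int) 1 by rw [hcast]]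
    rw [pvFold_eq _ _ hn]
    simp only [not_le.mpr hle, if_false]
    rw [hy]
    rcases hfst : (y :: ys).map Prod.fst with _ | ⟨f, fs⟩
    · simp at hfst
    rcases hsnd : (y :: ys).map Prod.snd with _ | ⟨g, gs⟩
    · simp at hsnd
    have hrows1 : ((List.range length.toNat).map
        (fun i : Nat => PySem.Str.split₀ ((PySem.List.pyGet? input_arr (i : Int)).getD ""))).map
          (fun r => pvTok r 0) = (y :: ys).map Prod.fst := by
      rw [List.map_map, ← hy, List.map_map]; rfl
    have hrows2 : ((List.range length.toNat).map
        (fun i : Nat => PySem.Str.split₀ ((PySem.List.pyGet? input_arr (i : Int)).getD ""))).map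
          (fun r => pvTok r 1) = (y :: ys).map Prod.snd := by
      rw [List.map_map, ← hy, List.map_map]; rfl
    rw [hrows1, hrows2, hfst, hsnd, sorted_head_eq_pvMin, sorted_head_eq_pvMin]

-- ===== VERDICT (by name: the statement is the Claim_ definition above) =====
theorem maximizer_spec : Claim_equal_maximizer := by
  intro length input_arr _ _
  unfold Spec_maximizer
  exact maximizer_eq_alt length input_arr
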